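-- pv_equiv track=rewrite | github.com/cwida/FastLanesGpu-Damon2025 | benchmark-scripts/grapher.py | replace_label
-- ===== SOURCE A (Python) =====
-- def replace_label(label: str, name_and_order_map: dict[str, str]) -> str:
--     # Sort on lenght of substring to avoid short substring
--     # replacing long ones first
--     for key, value in sorted(
--         name_and_order_map.items(),
--         key=lambda x: len(x[0]),
--         reverse=True,
--     ):
--         if key in label:
--             return label.replace(key, value)
--     return label
-- ===== SOURCE B (Python) =====
-- def replace_label(label: str, name_and_order_map: dict[str, str]) -> str:
--     # Single pass: keep the longest matching key (first wins on ties,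
--     # matching the stable sort's order).
--     best = None
--     for key, value in name_and_order_map.items():
--         if (best is None or len(key) > len(best[0])) and key in label:
--             best = (key, value)
--     if best is None:
--         return label
--     return label.replace(best[0], best[1])
-- ===== Notes on version B (the rewrite author's own statement) =====
-- stated objective: alternative
-- what changed: Replaced sort-then-scan-for-first-match with a single max-selection pass over the items in insertion order (strict '>' so the first of equal-length matching keys wins, as with the stable sort), then one replace.
import Mathlib
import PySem

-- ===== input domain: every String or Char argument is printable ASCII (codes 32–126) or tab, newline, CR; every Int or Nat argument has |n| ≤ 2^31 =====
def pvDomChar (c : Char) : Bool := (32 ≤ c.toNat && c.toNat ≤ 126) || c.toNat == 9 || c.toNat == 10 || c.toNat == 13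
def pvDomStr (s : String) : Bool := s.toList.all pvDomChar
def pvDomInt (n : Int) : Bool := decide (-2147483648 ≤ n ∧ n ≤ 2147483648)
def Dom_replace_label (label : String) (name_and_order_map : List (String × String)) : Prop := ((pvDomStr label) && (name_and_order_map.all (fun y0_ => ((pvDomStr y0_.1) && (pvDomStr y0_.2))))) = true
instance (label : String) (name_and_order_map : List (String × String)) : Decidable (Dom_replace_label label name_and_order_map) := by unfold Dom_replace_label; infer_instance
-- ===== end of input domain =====

-- B replaces A's sort-then-scan by a single max-selection pass (longest matching key, first wins on ties); return value only.


-- ===== PORT A =====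
-- the 'for key, value in sorted(...)' loop with its early return
def pvReplaceLoop (label : String) : List (String × String) → String
  | [] => label
  | (key, value) :: rest =>
      if PySem.Str.isIn key label then PySem.Str.replace label key value
      else pvReplaceLoop label rest

def replace_label (label : String) (name_and_order_map : List (String × String)) : String :=
  pvReplaceLoop label
    (PySem.List.sorted name_and_order_map (fun x => PySem.Str.len x.1) true)

-- ===== PORT B =====
-- single pass keeping the best (longest, first on ties) matching key, then one replace
def replace_label_alt (label : String) (name_and_order_map : List (String × String)) : String :=
  match name_and_order_map.foldl
      (fun best p =>
        if (match best with
            | none => true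
            | some q => decide (PySem.Str.len q.1 < PySem.Str.len p.1)) &&
            PySem.Str.isIn p.1 label
        then some p else best)
      none with
  | none => label
  | some p => PySem.Str.replace label p.1 p.2

-- ===== PRECONDITION & SPEC =====
def Spec_replace_label (label : String) (name_and_order_map : List (String × String)) (out : String) : Prop := out = replace_label_alt label name_and_order_map
instance (label : String) (name_and_order_map : List (String × String)) (out : String) : Decidable (Spec_replace_label label name_and_order_map out) := by unfold Spec_replace_label; infer_instance

-- ===== CLAIM (what is proved, stated in full; the proofs are below) =====
def Claim_equal_replace_label : Prop := ∀ (label : String) (name_and_order_map : List (String × String)), Dom_replace_label label name_and_order_map → Spec_replace_label label name_and_order_map (replace_label label name_and_order_map)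

-- ===== LEMMAS AND PROOFS =====

-- A's loop is 'first match in the list, or label'
lemma pvReplaceLoop_eq_find? (label : String) (l : List (String × String)) :
    pvReplaceLoop label l =
      match l.find? (fun p => PySem.Str.isIn p.1 label) with
      | none => label
      | some p => PySem.Str.replace label p.1 p.2 := by
  induction l with
  | nil => rfl
  | cons hd tl ih =>
      obtain ⟨k, v⟩ := hd
      cases h : PySem.Chars.isIn k.toList label.toList <;>
        simp [pvReplaceLoop, List.find?_cons, PySem.Str.isIn, h, ih]

-- first P-element after a stable descending insert
lemma find?_insertBy {α : Type} (key : α → Int) (P : α → Bool) (x : α) (s : List α)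
    (hs : s.Pairwise (fun a b => key b ≤ key a)) :
    (PySem.List.insertBy (fun a b => decide (key b < key a)) x s).find? P =
      (match s.find? P with
       | none => if P x then some x else none
       | some b => if P x && decide (key b < key x) then some x else some b) := by
  induction s with
  | nil =>
      cases hPx : P x <;> simp [PySem.List.insertBy, List.find?, hPx]
  | cons y ys ih =>
      have hy : ∀ z ∈ ys, key z ≤ key y := by
        intro z hz; exact (List.pairwise_cons.mp hs).1 z hz
      have hs' : ys.Pairwise (fun a b => key b ≤ key a) := (List.pairwise_cons.mp hs).2
      by_cases hlt : key y < key x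
      · -- x goes in front; every element of y::ys has key < key x
        have : PySem.List.insertBy (fun a b => decide (key b < key a)) x (y :: ys)
            = x :: y :: ys := by simp [PySem.List.insertBy, hlt]
        rw [this]
        cases hPx : P x
        · cases hF : (y :: ys).find? P <;> simp [List.find?_cons, hPx, hF]
        · cases hF : (y :: ys).find? P with
          | none => simp [List.find?_cons, hPx, hF]
          | some b =>
              have hb : b ∈ y :: ys := List.mem_of_find?_eq_some hF
              have hble : key b ≤ key y := by
                rcases List.mem_cons.mp hb with h | h
                · exact le_of_eq (by rw [h])
                · exact hy b h
              have : key b < key x := lt_of_le_of_lt hble hlt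
              simp [List.find?_cons, hPx, hF, this]
      · -- x goes after y
        have : PySem.List.insertBy (fun a b => decide (key b < key a)) x (y :: ys)
            = y :: PySem.List.insertBy (fun a b => decide (key b < key a)) x ys := by
          simp [PySem.List.insertBy, hlt]
        rw [this]
        by_cases hPy : P y
        · have hxy : ¬ key y < key x := hlt
          simp [List.find?_cons, hPy, hxy]
        · simp only [List.find?_cons, hPy, cond_false]
          exact ih hs'

-- first match in the stable descending sort = strict-max selection fold over the original order
lemma find?_sorted_rev {α : Type} (key : α → Int) (P : α → Bool)
    (f : Option α → α → Option α)
    (hf : ∀ b x, f b x =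
      (if P x &&
          (match b with
           | none => true
           | some q => decide (key q < key x))
        then some x else b))
    (l : List α) :
    (PySem.List.sorted l key true).find? P = l.foldl f none := by
  induction l using List.reverseRecOn with
  | nil => simp [PySem.List.sorted_rev_eq_foldl_insertBy]
  | append_singleton xs x ih =>
      rw [PySem.List.sorted_rev_eq_foldl_insertBy, List.foldl_append, List.foldl_append]
      simp only [List.foldl_cons, List.foldl_nil]
      rw [← PySem.List.sorted_rev_eq_foldl_insertBy]
      rw [find?_insertBy key P x _ (PySem.List.sorted_pairwise_rev xs key)]
      rw [ih, hf]
      cases hF : (xs.foldl f none) with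
      | none => cases hPx : P x <;> simp [hPx]
      | some b => cases hPx : P x <;> simp [hPx]

-- ===== VERDICT (by name: the statement is the Claim_ definition above) =====
theorem replace_label_spec : Claim_equal_replace_label := by
  intro label m _
  unfold Spec_replace_label replace_label replace_label_alt
  rw [pvReplaceLoop_eq_find?,
    find?_sorted_rev (fun x => PySem.Str.len x.1) (fun p => PySem.Str.isIn p.1 label) _ ?hf m]
  case hf => intro b x; cases b <;> simp [Bool.and_comm]
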